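-- pv_equiv track=rewrite | github.com/DannyZednickova/_DIPLOMKA | CTI_Code/middleware_to_neo/NEW_CTI_TO_NEO.py | stix_type_to_label
-- ===== SOURCE A (Python) =====
-- def stix_type_to_label(stix_type: str) -> str:
--     mapping = {
--         "malware": "Malware",
--         "attack-pattern": "AttackPattern",
--         "intrusion-set": "IntrusionSet",
--         "vulnerability": "Vulnerability",
--         "threat-actor": "ThreatActor",
--         "campaign": "Campaign",
--         "indicator": "Indicator",
--         "tool": "Tool",
--         "identity": "Identity",
--         "report": "Report",
--     }
--     if stix_type in mapping:
--         return mapping[stix_type]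
--     return "".join(part.capitalize() for part in stix_type.split("-"))
-- ===== SOURCE B (Python) =====
-- def stix_type_to_label(stix_type: str) -> str:
--     return "".join(part.capitalize() for part in stix_type.split("-"))
-- ===== Notes on version B (the rewrite author's own statement) =====
-- stated objective: simpler
-- what changed: Dropped the ten-entry lookup table and the membership branch: every table value equals what the capitalize-join fallback computes, so B is the single unconditional join expression.
import Mathlib
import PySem

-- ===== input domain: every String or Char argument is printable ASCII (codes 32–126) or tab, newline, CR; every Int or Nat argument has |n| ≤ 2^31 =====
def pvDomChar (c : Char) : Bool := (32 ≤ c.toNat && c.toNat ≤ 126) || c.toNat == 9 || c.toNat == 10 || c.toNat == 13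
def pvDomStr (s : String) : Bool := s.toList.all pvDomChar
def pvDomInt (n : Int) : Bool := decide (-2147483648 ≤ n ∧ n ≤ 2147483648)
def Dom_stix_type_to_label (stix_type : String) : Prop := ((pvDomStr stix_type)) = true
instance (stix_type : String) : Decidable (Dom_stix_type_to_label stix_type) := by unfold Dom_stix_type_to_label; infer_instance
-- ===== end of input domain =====

-- B drops the redundant ten-entry lookup table: every table value equals the capitalize-join fallback, so B is the single join expression (objective: simpler).
-- Both ports convert the string to its char list once (String.toList) and work on the list side via PySem.Chars, wrapping the result with String.ofList.

-- ===== PORT A =====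
-- Python str.capitalize, hand port (exact on Dom's ASCII strings): first char uppercased, rest lowercased
def pyCapitalize (cs : List Char) : List Char :=
  match cs with
  | [] => []
  | c :: rest => PySem.Chars.upperChar c :: PySem.Chars.lower rest

-- the literal dict of A, keys and values as char lists
def stixMapping : PySem.Dict (List Char) (List Char) :=
  PySem.Dict.mk [(['m', 'a', 'l', 'w', 'a', 'r', 'e'], ['M', 'a', 'l', 'w', 'a', 'r', 'e']),
    (['a', 't', 't', 'a', 'c', 'k', '-', 'p', 'a', 't', 't', 'e', 'r', 'n'], ['A', 't', 't', 'a', 'c', 'k', 'P', 'a', 't', 't', 'e', 'r', 'n']),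
    (['i', 'n', 't', 'r', 'u', 's', 'i', 'o', 'n', '-', 's', 'e', 't'], ['I', 'n', 't', 'r', 'u', 's', 'i', 'o', 'n', 'S', 'e', 't']),
    (['v', 'u', 'l', 'n', 'e', 'r', 'a', 'b', 'i', 'l', 'i', 't', 'y'], ['V', 'u', 'l', 'n', 'e', 'r', 'a', 'b', 'i', 'l', 'i', 't', 'y']),
    (['t', 'h', 'r', 'e', 'a', 't', '-', 'a', 'c', 't', 'o', 'r'], ['T', 'h', 'r', 'e', 'a', 't', 'A', 'c', 't', 'o', 'r']),
    (['c', 'a', 'm', 'p', 'a', 'i', 'g', 'n'], ['C', 'a', 'm', 'p', 'a', 'i', 'g', 'n']),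
    (['i', 'n', 'd', 'i', 'c', 'a', 't', 'o', 'r'], ['I', 'n', 'd', 'i', 'c', 'a', 't', 'o', 'r']),
    (['t', 'o', 'o', 'l'], ['T', 'o', 'o', 'l']),
    (['i', 'd', 'e', 'n', 't', 'i', 't', 'y'], ['I', 'd', 'e', 'n', 't', 'i', 't', 'y']),
    (['r', 'e', 'p', 'o', 'r', 't'], ['R', 'e', 'p', 'o', 'r', 't'])]

-- A on the char-list side: membership branch over the dict, else capitalize-join of split on '-'
def stixA (cs : List Char) : List Char :=
  if stixMapping.contains cs then stixMapping.getD cs []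
  else PySem.Chars.join [] ((PySem.Chars.splitOn cs ['-']).map pyCapitalize)

def stix_type_to_label (stix_type : String) : String :=
  String.ofList (stixA stix_type.toList)

-- ===== PORT B =====
def stixB (cs : List Char) : List Char :=
  PySem.Chars.join [] ((PySem.Chars.splitOn cs ['-']).map pyCapitalize)

def stix_type_to_label_alt (stix_type : String) : String :=
  String.ofList (stixB stix_type.toList)

-- ===== PRECONDITION & SPEC =====
def Spec_stix_type_to_label (stix_type : String) (out : String) : Prop := out = stix_type_to_label_alt stix_type
instance (stix_type : String) (out : String) : Decidable (Spec_stix_type_to_label stix_type out) := by unfold Spec_stix_type_to_label; infer_instance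

-- ===== CLAIM (what is proved, stated in full; the proofs are below) =====
def Claim_equal_stix_type_to_label : Prop := ∀ (stix_type : String), Dom_stix_type_to_label stix_type → Spec_stix_type_to_label stix_type (stix_type_to_label stix_type)

-- ===== LEMMAS AND PROOFS =====
-- every dict value equals what the fallback computes, so the membership branch is redundant
theorem stixA_eq_stixB (cs : List Char) : stixA cs = stixB cs := by
  by_cases h1 : cs = ['m', 'a', 'l', 'w', 'a', 'r', 'e'];   · subst h1; decide
  by_cases h2 : cs = ['a', 't', 't', 'a', 'c', 'k', '-', 'p', 'a', 't', 't', 'e', 'r', 'n'];   · subst h2; decide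
  by_cases h3 : cs = ['i', 'n', 't', 'r', 'u', 's', 'i', 'o', 'n', '-', 's', 'e', 't'];   · subst h3; decide
  by_cases h4 : cs = ['v', 'u', 'l', 'n', 'e', 'r', 'a', 'b', 'i', 'l', 'i', 't', 'y'];   · subst h4; decide
  by_cases h5 : cs = ['t', 'h', 'r', 'e', 'a', 't', '-', 'a', 'c', 't', 'o', 'r'];   · subst h5; decide
  by_cases h6 : cs = ['c', 'a', 'm', 'p', 'a', 'i', 'g', 'n'];   · subst h6; decide
  by_cases h7 : cs = ['i', 'n', 'd', 'i', 'c', 'a', 't', 'o', 'r'];   · subst h7; decide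
  by_cases h8 : cs = ['t', 'o', 'o', 'l'];   · subst h8; decide
  by_cases h9 : cs = ['i', 'd', 'e', 'n', 't', 'i', 't', 'y'];   · subst h9; decide
  by_cases h10 : cs = ['r', 'e', 'p', 'o', 'r', 't'];   · subst h10; decide
  have hc : stixMapping.contains cs = false := by
    rw [PySem.Dict.contains_eq_decide_mem_keys]
    simp only [stixMapping, PySem.Dict.keys_mk, List.map_cons, List.map_nil, decide_eq_false_iff_not,
      List.mem_cons, List.not_mem_nil, or_false, not_or]
    exact ⟨h1, h2, h3, h4, h5, h6, h7, h8, h9, h10⟩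
  simp [stixA, stixB, hc]

-- ===== VERDICT (by name: the statement is the Claim_ definition above) =====
theorem stix_type_to_label_spec : Claim_equal_stix_type_to_label := by
  intro s _
  unfold Spec_stix_type_to_label stix_type_to_label stix_type_to_label_alt
  exact congrArg String.ofList (stixA_eq_stixB s.toList)
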